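-- pv_equiv track=rewrite | github.com/fstahlberg/ucam-scripts | t2t/t2t_refine_with_glue_lm.py | _gen_seg_and_pos
-- ===== SOURCE A (Python) =====
-- BOS_ID = 2
--
-- def _gen_seg_and_pos(glued):
--     seg = []
--     pos = []
--     cur_seg = 1
--     cur_pos = 0
--     for w in glued:
--         seg.append(cur_seg)
--         pos.append(cur_pos)
--         if w == BOS_ID:
--             cur_seg += 1
--             cur_pos = 0
--         else:
--             cur_pos += 1
--     return seg, pos
-- ===== SOURCE B (Python) =====
-- BOS_ID = 2
--
-- def _gen_seg_and_pos(glued):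
--     # Segment-first decomposition: cut the stream into groups ending at each
--     # BOS token, then emit seg/pos per group with its 1-based index.
--     groups = []
--     cur = []
--     for w in glued:
--         cur.append(w)
--         if w == BOS_ID:
--             groups.append(cur)
--             cur = []
--     if cur:
--         groups.append(cur)
--     seg = []
--     pos = []
--     k = 1
--     for g in groups:
--         seg += [k] * len(g)
--         pos += list(range(len(g)))
--         k += 1
--     return seg, pos
-- ===== Notes on version B (the rewrite author's own statement) =====
-- stated objective: alternative
-- what changed: Replaces the element-wise state machine (cur_seg/cur_pos counters updated per token) with a segment-first decomposition: cut the stream into BOS-terminated groups, then emit [k]*len(g) and range(len(g)) per group.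
import Mathlib
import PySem

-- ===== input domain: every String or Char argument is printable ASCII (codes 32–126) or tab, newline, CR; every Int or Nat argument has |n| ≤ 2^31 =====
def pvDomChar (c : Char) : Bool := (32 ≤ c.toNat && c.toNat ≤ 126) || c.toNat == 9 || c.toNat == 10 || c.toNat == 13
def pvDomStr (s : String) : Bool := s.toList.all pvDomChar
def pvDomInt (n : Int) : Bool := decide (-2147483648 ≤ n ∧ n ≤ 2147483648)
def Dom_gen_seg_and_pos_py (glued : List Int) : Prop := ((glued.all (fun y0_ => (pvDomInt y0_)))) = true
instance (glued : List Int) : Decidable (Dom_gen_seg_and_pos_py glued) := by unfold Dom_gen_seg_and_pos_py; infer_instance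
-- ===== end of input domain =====

-- B replaces A's element-wise cur_seg/cur_pos state machine with a segment-first
-- decomposition (cut at BOS, then emit [k]*len and range(len) per group); alternative, same cost.


def pvBOS : Int := 2

-- ===== PORT A =====
-- loop body of A: append cur_seg/cur_pos, then update the counters
def pvStepA (st : List Int × List Int × Int × Int) (w : Int) : List Int × List Int × Int × Int :=
  let seg := st.1 ++ [st.2.2.1]
  let pos := st.2.1 ++ [st.2.2.2]
  if w == pvBOS then (seg, pos, st.2.2.1 + 1, 0)
  else (seg, pos, st.2.2.1, st.2.2.2 + 1)

def gen_seg_and_pos_py (glued : List Int) : List Int × List Int :=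
  let st := glued.foldl pvStepA ([], [], 1, 0)
  (st.1, st.2.1)

-- ===== PORT B =====
-- first loop of B: cut into BOS-terminated groups, nonempty remainder kept
def pvGroups (glued : List Int) (cur : List Int) : List (List Int) :=
  match glued with
  | [] => if cur = [] then [] else [cur]
  | w :: rest =>
      if w == pvBOS then (cur ++ [w]) :: pvGroups rest []
      else pvGroups rest (cur ++ [w])

-- second loop of B: seg += [k]*len(g); pos += list(range(len(g))); k += 1
def pvStepB (st : List Int × List Int × Int) (g : List Int) : List Int × List Int × Int :=
  (st.1 ++ List.replicate g.length st.2.2,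
   st.2.1 ++ (List.range g.length).map (fun i => (i : Int)),
   st.2.2 + 1)

def gen_seg_and_pos_py_alt (glued : List Int) : List Int × List Int :=
  let groups := pvGroups glued []
  let st := groups.foldl pvStepB ([], [], 1)
  (st.1, st.2.1)

-- ===== PRECONDITION & SPEC =====
def Spec_gen_seg_and_pos_py (glued : List Int) (out : List Int × List Int) : Prop := out = gen_seg_and_pos_py_alt glued
instance (glued : List Int) (out : List Int × List Int) : Decidable (Spec_gen_seg_and_pos_py glued out) := by unfold Spec_gen_seg_and_pos_py; infer_instance

-- ===== CLAIM (what is proved, stated in full; the proofs are below) =====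
def Claim_equal_gen_seg_and_pos_py : Prop := ∀ (glued : List Int), Dom_gen_seg_and_pos_py glued → Spec_gen_seg_and_pos_py glued (gen_seg_and_pos_py glued)

-- ===== LEMMAS AND PROOFS =====

-- accumulator-free form of A's loop
def pvRunA : List Int → Int → Int → List Int × List Int
  | [], _, _ => ([], [])
  | w :: rest, cs, cp =>
      if w == pvBOS then
        let r := pvRunA rest (cs + 1) 0
        (cs :: r.1, cp :: r.2)
      else
        let r := pvRunA rest cs (cp + 1)
        (cs :: r.1, cp :: r.2)

-- accumulator-free form of B's emitting loop
def pvRunB : List (List Int) → Int → List Int × List Int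
  | [], _ => ([], [])
  | g :: rest, k =>
      let r := pvRunB rest (k + 1)
      (List.replicate g.length k ++ r.1,
       (List.range g.length).map (fun i => (i : Int)) ++ r.2)

theorem pvFoldA_acc (glued : List Int) (seg pos : List Int) (cs cp : Int) :
    (glued.foldl pvStepA (seg, pos, cs, cp)).1 = seg ++ (pvRunA glued cs cp).1 ∧
    (glued.foldl pvStepA (seg, pos, cs, cp)).2.1 = pos ++ (pvRunA glued cs cp).2 := by
  induction glued generalizing seg pos cs cp with
  | nil => simp [pvRunA]
  | cons w rest ih =>
      by_cases h : w = pvBOS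
      · simpa [pvStepA, pvRunA, h] using ih (seg ++ [cs]) (pos ++ [cp]) (cs + 1) 0
      · simpa [pvStepA, pvRunA, h] using ih (seg ++ [cs]) (pos ++ [cp]) cs (cp + 1)

theorem pvFoldB_acc (groups : List (List Int)) (seg pos : List Int) (k : Int) :
    (groups.foldl pvStepB (seg, pos, k)).1 = seg ++ (pvRunB groups k).1 ∧
    (groups.foldl pvStepB (seg, pos, k)).2.1 = pos ++ (pvRunB groups k).2 := by
  induction groups generalizing seg pos k with
  | nil => simp [pvRunB]
  | cons g rest ih =>
      simpa [pvStepB, pvRunB] using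
        ih (seg ++ List.replicate g.length k)
           (pos ++ (List.range g.length).map (fun i => (i : Int))) (k + 1)

theorem pvRunB_groups (glued : List Int) (cur : List Int) (cs : Int) :
    pvRunB (pvGroups glued cur) cs =
      (List.replicate cur.length cs ++ (pvRunA glued cs (cur.length : Int)).1,
       (List.range cur.length).map (fun i => (i : Int)) ++ (pvRunA glued cs (cur.length : Int)).2) := by
  induction glued generalizing cur cs with
  | nil =>
      by_cases h : cur = []
      · simp [pvGroups, pvRunA, pvRunB, h]
      · simp [pvGroups, pvRunA, pvRunB, h]
  | cons w rest ih =>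
      by_cases h : w = pvBOS
      · have := ih ([] : List Int) (cs + 1)
        simp [pvGroups, pvRunA, pvRunB, h, this, List.replicate_succ',
          List.range_succ, List.append_assoc]
      · have := ih (cur ++ [w]) cs
        simp [pvGroups, pvRunA, h, this, List.replicate_succ',
          List.range_succ, List.append_assoc]

-- ===== VERDICT (by name: the statement is the Claim_ definition above) =====
theorem gen_seg_and_pos_py_spec : Claim_equal_gen_seg_and_pos_py := by
  intro glued _
  unfold Spec_gen_seg_and_pos_py gen_seg_and_pos_py gen_seg_and_pos_py_alt
  have hA := pvFoldA_acc glued [] [] 1 0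
  have hB := pvFoldB_acc (pvGroups glued []) [] [] 1
  have hG := pvRunB_groups glued [] 1
  simp at hG
  simp [hA.1, hA.2, hB.1, hB.2, hG]
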